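-- pv_equiv track=rewrite | github.com/guilehm/numbers-to-text | test_numbers_to_text.py | split_in_three
-- ===== SOURCE A (Python) =====
-- def split_in_three(number):
--     number = str(number) # refactor
--     numbers = []
--     while True:
--         numbers.insert(0, number[-3:])
--         number = number[:-3]
--         if not number:
--             break
--     for weight, number in enumerate(reversed(numbers)):
--         yield (number, weight)
-- ===== SOURCE B (Python) =====
-- def split_in_three(number):
--     s = str(number)
--     i = len(s)
--     weight = 0
--     while True:
--         yield (s[max(0, i - 3):i], weight)
--         i = max(0, i - 3)
--         weight += 1
--         if i == 0:
--             break
-- ===== Notes on version B (the rewrite author's own statement) =====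
-- stated objective: simpler
-- what changed: B replaces A's build-a-list-by-front-insertion-then-reverse-and-enumerate generator with a single right-to-left index pass over the string that yields each group directly, maintaining only an index and a weight counter.
import Mathlib
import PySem

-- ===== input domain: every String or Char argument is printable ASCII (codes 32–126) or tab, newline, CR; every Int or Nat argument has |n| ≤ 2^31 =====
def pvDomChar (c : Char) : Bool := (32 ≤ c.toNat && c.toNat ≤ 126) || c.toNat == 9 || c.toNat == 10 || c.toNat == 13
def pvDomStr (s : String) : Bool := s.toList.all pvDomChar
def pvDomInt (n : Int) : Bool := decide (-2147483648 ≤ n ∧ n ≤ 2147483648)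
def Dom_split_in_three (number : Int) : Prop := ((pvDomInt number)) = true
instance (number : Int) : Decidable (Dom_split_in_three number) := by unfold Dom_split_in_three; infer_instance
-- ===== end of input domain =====

-- B replaces A's front-insertion list + reversed() + enumerate with a single
-- right-to-left index pass that produces each (group, weight) pair directly (simpler).

-- ===== PORT A =====
-- A's while-loop: insert number[-3:] at the front, cut the last three chars, stop when empty.
-- Exact here: with Nat subtraction, number[-3:] = drop (len-3) and number[:-3] = take (len-3)
-- (Python clamps the -3 bound to 0 when len < 3, which Nat subtraction reproduces).
def split_in_three_loop (s : List Char) (numbers : List (List Char)) : List (List Char) :=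
  let chunk := s.drop (s.length - 3)
  let rest := s.take (s.length - 3)
  if h : rest.isEmpty then chunk :: numbers else split_in_three_loop rest (chunk :: numbers)
termination_by s.length
decreasing_by
  simp only [List.isEmpty_iff, List.take_eq_nil_iff, not_or, rest] at h
  have := List.length_pos_iff.mpr h.2
  simp only [List.length_take]
  omega

def split_in_three (number : Int) : List (String × Int) :=
  let s := (PySem.Int.toStr number).toList
  let numbers := split_in_three_loop s []
  (PySem.List.enumerate numbers.reverse 0).map (fun p => (String.ofList p.2, p.1))

-- ===== PORT B =====
-- B's do-while: yield (s[max(0,i-3):i], weight); i := max(0,i-3); weight += 1; stop at i = 0.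
-- s[max(0,i-3):i] with 0 ≤ i-3 ≤ i ≤ len is exactly extract (i-3) i (Nat subtraction = max(0, i-3)).
def split_in_three_alt_loop (s : List Char) (i : Nat) (weight : Int) : List (String × Int) :=
  let j := i - 3
  let out := (String.ofList (s.extract j i), weight)
  if h : j = 0 then [out] else out :: split_in_three_alt_loop s j (weight + 1)
termination_by i
decreasing_by simp only [j] at h ⊢; omega

def split_in_three_alt (number : Int) : List (String × Int) :=
  let s := (PySem.Int.toStr number).toList
  split_in_three_alt_loop s s.length 0

-- ===== PRECONDITION & SPEC =====
def Spec_split_in_three (number : Int) (out : List (String × Int)) : Prop := out = split_in_three_alt number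
instance (number : Int) (out : List (String × Int)) : Decidable (Spec_split_in_three number out) := by unfold Spec_split_in_three; infer_instance

-- ===== CLAIM (what is proved, stated in full; the proofs are below) =====
def Claim_equal_split_in_three : Prop := ∀ (number : Int), Dom_split_in_three number → Spec_split_in_three number (split_in_three number)

-- ===== LEMMAS AND PROOFS =====

-- A's accumulator is just appended on the right of the chunks of s.
theorem split_in_three_loop_acc (n : Nat) (s : List Char) (hn : s.length ≤ n)
    (acc : List (List Char)) :
    split_in_three_loop s acc = split_in_three_loop s [] ++ acc := by
  induction n generalizing s acc with
  | zero =>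
      have hs : s = [] := by
        cases s with
        | nil => rfl
        | cons a t => simp at hn
      subst hs
      simp [split_in_three_loop]
  | succ n ih =>
      conv_lhs => rw [split_in_three_loop]
      conv_rhs => rw [split_in_three_loop]
      by_cases h : (s.take (s.length - 3)).isEmpty
      · simp [h]
      · simp only [h, dif_neg, Bool.false_eq_true, not_false_iff]
        have hrest : (s.take (s.length - 3)).length ≤ n := by
          simp only [List.isEmpty_iff, List.take_eq_nil_iff, not_or] at h
          have := List.length_pos_iff.mpr h.2
          simp only [List.length_take]
          omega
        rw [ih _ hrest, ih _ hrest [s.drop (s.length - 3)]]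
        simp

-- The reversed chunk list, unfolded one step.
theorem reverse_loop_step (s : List Char) :
    (split_in_three_loop s []).reverse =
      s.drop (s.length - 3) ::
        (if (s.take (s.length - 3)).isEmpty then []
         else (split_in_three_loop (s.take (s.length - 3)) []).reverse) := by
  rw [split_in_three_loop]
  by_cases h : (s.take (s.length - 3)).isEmpty
  · simp [h]
  · simp only [h, dif_neg, if_neg, Bool.false_eq_true, not_false_iff]
    rw [split_in_three_loop_acc (s.take (s.length - 3)).length _ le_rfl]
    simp

-- Main bridge: B's pass over s.take i equals enumerating A's reversed chunks of s.take i.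
theorem loopB_eq (s : List Char) (i : Nat) (hi : i ≤ s.length) (w : Int) :
    split_in_three_alt_loop s i w =
      (PySem.List.enumerate (split_in_three_loop (s.take i) []).reverse w).map
        (fun p => (String.ofList p.2, p.1)) := by
  induction i using Nat.strong_induction_on generalizing w with
  | _ i ih =>
    have hlen : (s.take i).length = i := by simp; omega
    have hstep := reverse_loop_step (s.take i)
    rw [hlen] at hstep
    have hdrop : (s.take i).drop (i - 3) = s.extract (i - 3) i := by
      rw [List.drop_take, List.extract_eq_take_drop]
    have htake : (s.take i).take (i - 3) = s.take (i - 3) := by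
      rw [List.take_take]
      congr 1
      omega
    rw [hdrop, htake] at hstep
    rw [split_in_three_alt_loop, hstep]
    by_cases hj : i - 3 = 0
    · simp [hj]
    · have hempty : ¬ (s.take (i - 3)).isEmpty = true := by
        simp only [List.isEmpty_iff, List.take_eq_nil_iff, not_or]
        constructor
        · exact hj
        · intro hnil
          subst hnil
          simp at hi
          omega
      simp only [hj, dif_neg, not_false_iff, hempty,
        PySem.List.enumerate_cons, List.map_cons]
      rw [ih (i - 3) (by omega) (by omega) (w + 1)]
      simp

-- ===== VERDICT (by name: the statement is the Claim_ definition above) =====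
theorem split_in_three_spec : Claim_equal_split_in_three := by
  intro number _
  unfold Spec_split_in_three split_in_three split_in_three_alt
  rw [loopB_eq _ _ le_rfl, List.take_length]
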